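-- pv_equiv track=rewrite | github.com/DanilT-20/AGE | егкр-11-03-25/task-25.py | f
-- ===== SOURCE A (Python) =====
-- def f(num):
--     res = set()
--     for i in range(2, int(num**0.5) + 1):
--         if num%i == 0:
--             res |= {i, num//i}
--     res = sorted([i for i in res if i % 2 != 0])
--     if len(res) < 6:
--         return 0
--     return res[-6]
-- ===== SOURCE B (Python) =====
-- def f(num):
--     if num <= 0:
--         return 0
--     m = num
--     while m % 2 == 0:
--         m //= 2
--     # all divisors of the odd part m are odd; collect them in order with odd trial divisors
--     small = []
--     large = []
--     d = 1
--     while d * d <= m: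
--         if m % d == 0:
--             small.append(d)
--             if d * d != m:
--                 large.append(m // d)
--         d += 2
--     divs = small[1:] + large[::-1]  # divisors of m except 1, ascending
--     if divs and divs[-1] == num:   # drop num itself (only when num is odd)
--         divs = divs[:-1]
--     if len(divs) < 6:
--         return 0
--     return divs[-6]
-- ===== Notes on version B (the rewrite author's own statement) =====
-- stated objective: alternative
-- what changed: Instead of A's set of divisor pairs from a sqrt(num) scan followed by an odd filter and a sort, B strips num to its odd part m and trial-divides m by odd candidates only, accumulating the small divisors and the reversed cofactors so the sorted result is built directly, excluding the unit divisor and num itself.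
import Mathlib
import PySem

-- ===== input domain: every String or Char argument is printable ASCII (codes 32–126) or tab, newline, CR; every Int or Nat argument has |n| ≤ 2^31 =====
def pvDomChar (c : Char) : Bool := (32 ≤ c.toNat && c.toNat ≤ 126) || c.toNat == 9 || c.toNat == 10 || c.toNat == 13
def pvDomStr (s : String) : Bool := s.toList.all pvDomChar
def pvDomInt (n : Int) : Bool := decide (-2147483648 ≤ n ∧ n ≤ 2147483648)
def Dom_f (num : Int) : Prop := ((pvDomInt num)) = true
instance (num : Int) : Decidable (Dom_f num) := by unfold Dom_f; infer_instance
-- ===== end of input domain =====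

-- B strips num to its odd part and trial-divides by odd candidates only, building the sorted
-- list of odd proper divisors directly (no set, no sort) (objective: alternative).

-- ===== PORT A =====
-- int(num**0.5): the float power is exactly ⌊√num⌋ for 0 ≤ num ≤ 2^31 (double sqrt is
-- correctly rounded and the gap to the next square exceeds the ulp there), ported as Nat.sqrt.
def f (num : Int) : Int :=
  let res : PySem.Set Int :=
    (PySem.List.pyRange 2 ((Nat.sqrt num.toNat : Int) + 1) 1).foldl
      (fun s i =>
        if PySem.Int.mod num i = 0 then
          PySem.Set.union s (PySem.Set.ofList [i, PySem.Int.floordiv num i])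
        else s)
      PySem.Set.empty
  -- the set is consumed by filter-then-sorted(identity key): order-independent
  let res2 := PySem.List.sorted (res.filter (fun i => PySem.Int.mod i 2 != 0)) (fun x => x) false
  if res2.length < 6 then 0 else (PySem.List.pyGet? res2 (-6)).getD 0

-- ===== PORT B =====
-- while m % 2 == 0: m //= 2   (the '0 < m' conjunct is a totality guard only: B reaches this
-- loop only with num ≥ 1, where it never fires differently from the Python)
def oddPartB (m : Int) : Int :=
  if h : 0 < m ∧ PySem.Int.mod m 2 = 0 then oddPartB (PySem.Int.floordiv m 2)
  else m
termination_by m.toNat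
decreasing_by
  have h2 : PySem.Int.floordiv m 2 = m / 2 := PySem.Int.floordiv_eq_ediv_of_pos (by norm_num)
  rw [h2]; omega

-- while d * d <= m: if m % d == 0: small.append(d); if d*d != m: large.append(m//d); d += 2
def divLoopB (m d : Int) (small large : List Int) : List Int × List Int :=
  if h : d * d ≤ m then
    if PySem.Int.mod m d = 0 then
      divLoopB m (d + 2) (small ++ [d])
        (if d * d ≠ m then large ++ [PySem.Int.floordiv m d] else large)
    else
      divLoopB m (d + 2) small large
  else (small, large)
termination_by (m + 2 - d).toNat
decreasing_by
  all_goals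
    have h1 : 2 * d ≤ m + 1 := by nlinarith [sq_nonneg (d - 1)]
    have h2 : (0:Int) ≤ m := le_trans (mul_self_nonneg d) h
    omega

def f_alt (num : Int) : Int :=
  if num ≤ 0 then 0
  else
    let m := oddPartB num
    let p := divLoopB m 1 [] []
    -- divs = small[1:] + large[::-1]
    let divs := PySem.List.slice p.1 (some 1) none ++ p.2.reverse
    -- if divs and divs[-1] == num: divs = divs[:-1]
    let divs2 := if divs ≠ [] ∧ PySem.List.pyGet? divs (-1) = some num
                 then PySem.List.slice divs none (some (-1)) else divs
    if divs2.length < 6 then 0 else (PySem.List.pyGet? divs2 (-6)).getD 0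

-- ===== PRECONDITION & SPEC =====
-- Pre_f excludes negative num, where Python A raises TypeError (num**0.5 is a complex number).
def Pre_f (num : Int) : Prop := 0 ≤ num
instance (num : Int) : Decidable (Pre_f num) := by unfold Pre_f; infer_instance
def pvWitness_f : Int := 10395

def Spec_f (num : Int) (out : Int) : Prop := out = f_alt num
instance (num : Int) (out : Int) : Decidable (Spec_f num out) := by unfold Spec_f; infer_instance

-- ===== CLAIM (what is proved, stated in full; the proofs are below) =====
def Claim_equal_f : Prop := ∀ (num : Int), Dom_f num → Pre_f num → Spec_f num (f num)

-- ===== LEMMAS AND PROOFS =====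


-- casting bridge for Nat.sqrt on nonnegative Ints
lemma int_le_sqrt {a n : Int} (ha : 0 ≤ a) (hn : 0 ≤ n) (h : a * a ≤ n) :
    a ≤ (Nat.sqrt n.toNat : Int) := by
  have h1 : a.toNat * a.toNat ≤ n.toNat := by
    have : (a.toNat : Int) * a.toNat ≤ (n.toNat : Int) := by
      rw [Int.toNat_of_nonneg ha, Int.toNat_of_nonneg hn]; exact h
    exact_mod_cast this
  have := Nat.le_sqrt.mpr h1
  omega

lemma int_sqrt_le {a n : Int} (ha : 0 ≤ a) (hn : 0 ≤ n) (h : a ≤ (Nat.sqrt n.toNat : Int)) :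
    a * a ≤ n := by
  have h1 : a.toNat ≤ Nat.sqrt n.toNat := by omega
  have h2 := Nat.le_sqrt.mp h1
  have h3 : (a.toNat : Int) * a.toNat ≤ (n.toNat : Int) := by exact_mod_cast h2
  rw [Int.toNat_of_nonneg ha, Int.toNat_of_nonneg hn] at h3
  exact h3

-- membership in A's accumulated set, generically over the iteration list
lemma mem_pairs_foldl (n : Int) (l : List Int) (s : PySem.Set Int) (x : Int) :
    x ∈ l.foldl
      (fun s i =>
        if PySem.Int.mod n i = 0 then
          PySem.Set.union s (PySem.Set.ofList [i, PySem.Int.floordiv n i])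
        else s) s ↔
    x ∈ s ∨ ∃ i ∈ l, PySem.Int.mod n i = 0 ∧ (x = i ∨ x = PySem.Int.floordiv n i) := by
  induction l generalizing s with
  | nil => simp
  | cons a t ih =>
    simp only [List.foldl_cons, ih]
    split_ifs with h
    · simp only [PySem.Set.mem_union, PySem.Set.mem_ofList, List.mem_cons,
        List.not_mem_nil, or_false]
      constructor
      · rintro ((hs | hx) | ⟨i, hi, hm, hx⟩)
        · exact Or.inl hs
        · exact Or.inr ⟨a, Or.inl rfl, h, hx⟩
        · exact Or.inr ⟨i, Or.inr hi, hm, hx⟩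
      · rintro (hs | ⟨i, (rfl | hi), hm, hx⟩)
        · exact Or.inl (Or.inl hs)
        · exact Or.inl (Or.inr hx)
        · exact Or.inr ⟨i, hi, hm, hx⟩
    · constructor
      · rintro (hs | ⟨i, hi, hm, hx⟩)
        · exact Or.inl hs
        · exact Or.inr ⟨i, List.mem_cons_of_mem a hi, hm, hx⟩
      · rintro (hs | ⟨i, hi, hm, hx⟩)
        · exact Or.inl hs
        · rcases List.mem_cons.mp hi with rfl | hi'
          · exact absurd hm h
          · exact Or.inr ⟨i, hi', hm, hx⟩

lemma nodup_pairs_foldl (n : Int) (l : List Int) (s : PySem.Set Int) (hs : s.Nodup) :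
    (l.foldl
      (fun s i =>
        if PySem.Int.mod n i = 0 then
          PySem.Set.union s (PySem.Set.ofList [i, PySem.Int.floordiv n i])
        else s) s).Nodup := by
  induction l generalizing s with
  | nil => exact hs
  | cons a t ih =>
    simp only [List.foldl_cons]
    split_ifs with h
    · exact ih _ (PySem.Set.nodup_union _ _ hs)
    · exact ih _ hs

-- membership in A's set = "x is a divisor of n with 2 ≤ x and 2x ≤ n"  (for 0 ≤ n)
lemma mem_A_set (n : Int) (hn : 0 ≤ n) (x : Int) :
    (x ∈ (PySem.List.pyRange 2 ((Nat.sqrt n.toNat : Int) + 1) 1).foldl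
      (fun s i =>
        if PySem.Int.mod n i = 0 then
          PySem.Set.union s (PySem.Set.ofList [i, PySem.Int.floordiv n i])
        else s) PySem.Set.empty) ↔
    2 ≤ x ∧ 2 * x ≤ n ∧ x ∣ n := by
  rw [mem_pairs_foldl]
  have hempty : x ∉ (PySem.Set.empty : PySem.Set Int) := by simp [PySem.Set.empty]
  simp only [hempty, false_or, PySem.List.mem_pyRange_one]
  constructor
  · rintro ⟨i, ⟨h2, hlt⟩, hm, hx⟩
    have hi0 : 0 < i := by omega
    have hdvd : i ∣ n := by
      exact (PySem.Int.mod_eq_zero_iff_dvd n i).mp hm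
    have hii : i * i ≤ n := int_sqrt_le (by omega) hn (by omega)
    rcases hx with rfl | rfl
    · refine ⟨h2, by nlinarith, hdvd⟩
    · have hq : PySem.Int.floordiv n i = n / i := PySem.Int.floordiv_eq_ediv_of_pos (a := n) hi0
      rw [hq]
      obtain ⟨c, rfl⟩ := hdvd
      have hc : (i * c) / i = c := by
        rw [Int.mul_ediv_cancel_left _ (by omega)]
      rw [hc]
      have hc0 : 2 ≤ c := by nlinarith
      refine ⟨hc0, by nlinarith, ⟨i, by ring⟩⟩
  · rintro ⟨h2, h2x, hdvd⟩
    have hx0 : 0 < x := by omega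
    obtain ⟨c, rfl⟩ := hdvd
    have hc2 : 2 ≤ c := by nlinarith
    by_cases hcx : x ≤ c
    · -- x is the small cofactor: x*x ≤ x*c = n
      refine ⟨x, ⟨h2, ?_⟩, ?_, Or.inl rfl⟩
      · have := int_le_sqrt (a := x) (n := x * c) (by omega) (by nlinarith) (by nlinarith)
        omega
      · exact (PySem.Int.mod_eq_zero_iff_dvd _ _).mpr ⟨c, rfl⟩
    · -- c is the small cofactor: take i = c, x = n / c
      refine ⟨c, ⟨hc2, ?_⟩, ?_, Or.inr ?_⟩
      · have := int_le_sqrt (a := c) (n := x * c) (by omega) (by nlinarith) (by nlinarith)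
        omega
      · exact (PySem.Int.mod_eq_zero_iff_dvd _ _).mpr ⟨x, by ring⟩
      · rw [PySem.Int.floordiv_eq_ediv_of_pos (by omega)]
        rw [show x * c = c * x by ring, Int.mul_ediv_cancel_left _ (by omega)]

-- the sorted odd-filtered set equals B's filtered range
lemma sorted_eq_odds (n : Int) (hn : 0 ≤ n) :
    PySem.List.sorted
      (((PySem.List.pyRange 2 ((Nat.sqrt n.toNat : Int) + 1) 1).foldl
        (fun s i =>
          if PySem.Int.mod n i = 0 then
            PySem.Set.union s (PySem.Set.ofList [i, PySem.Int.floordiv n i])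
          else s) PySem.Set.empty).filter (fun i => PySem.Int.mod i 2 != 0))
      (fun x => x) false =
    (PySem.List.pyRange 2 n 1).filter
      (fun i => PySem.Int.mod n i == 0 && PySem.Int.mod i 2 != 0) := by
  apply PySem.List.sorted_eq_of_perm_of_pairwise_lt
  · -- permutation: both are nodup with the same membership
    refine (List.perm_ext_iff_of_nodup ((PySem.List.nodup_pyRange_one _ _).filter _)
      ((nodup_pairs_foldl n _ _ (by simp [PySem.Set.empty])).filter _)).mpr ?_
    intro a
    simp only [List.mem_filter, PySem.List.mem_pyRange_one, mem_A_set n hn,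
      Bool.and_eq_true, beq_iff_eq, bne_iff_ne, ne_eq]
    constructor
    · rintro ⟨⟨h2, hlt⟩, hm, hodd⟩
      have hdvd : a ∣ n := (PySem.Int.mod_eq_zero_iff_dvd _ _).mp hm
      obtain ⟨c, hc⟩ := hdvd
      have hc2 : 2 ≤ c := by nlinarith
      exact ⟨⟨h2, by nlinarith, ⟨c, hc⟩⟩, hodd⟩
    · rintro ⟨⟨h2, h2a, hdvd⟩, hodd⟩
      exact ⟨⟨h2, by omega⟩, (PySem.Int.mod_eq_zero_iff_dvd _ _).mpr hdvd, hodd⟩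
  · -- strictly increasing
    exact (PySem.List.pairwise_lt_pyRange_one 2 n).filter _


-- ===== B-side lemmas =====

-- an odd integer is coprime to 2: dividing 2*t it divides t
lemma odd_dvd_of_dvd_two_mul {x t : Int} (hx : x % 2 ≠ 0) (h : x ∣ 2 * t) : x ∣ t := by
  have h2 : ¬ (2:Int) ∣ x := by omega
  have hg : Int.gcd x 2 = 1 := by
    rcases (Nat.dvd_prime Nat.prime_two).mp (Nat.gcd_dvd_right x.natAbs 2) with h1 | h1
    · exact h1
    · exfalso
      have := Nat.gcd_dvd_left x.natAbs 2
      rw [h1] at this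
      omega
  have hc : IsCoprime x 2 := Int.isCoprime_iff_gcd_eq_one.mpr hg
  exact hc.dvd_of_dvd_mul_left h

-- odd part: positivity, divisibility, oddness, and preservation of odd divisors
lemma oddPartB_spec (m : Int) (hm : 0 < m) :
    0 < oddPartB m ∧ oddPartB m ∣ m ∧ oddPartB m % 2 = 1 ∧
      ∀ x : Int, x % 2 = 1 → (x ∣ m ↔ x ∣ oddPartB m) := by
  induction m using oddPartB.induct with
  | case1 m h ih =>
    obtain ⟨hm0, hme⟩ := h
    have hme' : m % 2 = 0 := by
      rwa [PySem.Int.mod_eq_emod_of_pos (by norm_num : (0:Int) < 2)] at hme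
    have hfd : PySem.Int.floordiv m 2 = m / 2 := PySem.Int.floordiv_eq_ediv_of_pos (by norm_num)
    have hh : 0 < m / 2 := by omega
    rw [hfd] at ih
    obtain ⟨ih1, ih2, ih3, ih4⟩ := ih hh
    have hme2 : m = 2 * (m / 2) := by omega
    rw [oddPartB, dif_pos ⟨hm0, hme⟩, hfd]
    refine ⟨ih1, dvd_trans ih2 ⟨2, by omega⟩, ih3, ?_⟩
    intro x hx
    rw [← ih4 x hx]
    constructor
    · intro hd
      exact odd_dvd_of_dvd_two_mul (by omega) (hme2 ▸ hd)
    · intro hd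
      exact dvd_trans hd ⟨2, by omega⟩
  | case2 m h =>
    rw [oddPartB, dif_neg h]
    rw [PySem.Int.mod_eq_emod_of_pos (by norm_num : (0:Int) < 2)] at h
    have : m % 2 = 1 := by omega
    exact ⟨hm, dvd_refl m, this, fun x _ => Iff.rfl⟩

-- one-step unfolding of the loop (stated exactly as the body)
lemma divLoopB_unfold (m d : Int) (s l : List Int) :
    divLoopB m d s l =
      if _h : d * d ≤ m then
        if PySem.Int.mod m d = 0 then
          divLoopB m (d + 2) (s ++ [d])
            (if d * d ≠ m then l ++ [PySem.Int.floordiv m d] else l)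
        else
          divLoopB m (d + 2) s l
      else (s, l) := by
  rw [divLoopB]

-- the accumulators only collect appends: factor them out
theorem divLoopB_acc (m d : Int) (s l : List Int) :
    divLoopB m d s l = (s ++ (divLoopB m d [] []).1, l ++ (divLoopB m d [] []).2) := by
  by_cases h : d * d ≤ m
  · rw [divLoopB_unfold m d s l, divLoopB_unfold m d [] [], dif_pos h, dif_pos h]
    by_cases hmod : PySem.Int.mod m d = 0
    · rw [if_pos hmod, if_pos hmod]
      by_cases hsq : d * d ≠ m
      · rw [if_pos hsq, if_pos hsq]
        rw [divLoopB_acc m (d + 2) ([] ++ [d]) ([] ++ [PySem.Int.floordiv m d]),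
          divLoopB_acc m (d + 2) (s ++ [d]) (l ++ [PySem.Int.floordiv m d])]
        simp
      · rw [if_neg hsq, if_neg hsq]
        rw [divLoopB_acc m (d + 2) ([] ++ [d]) [],
          divLoopB_acc m (d + 2) (s ++ [d]) l]
        simp
    · rw [if_neg hmod, if_neg hmod]
      exact divLoopB_acc m (d + 2) s l
  · rw [divLoopB_unfold m d s l, divLoopB_unfold m d [] [], dif_neg h, dif_neg h]
    simp
termination_by (m + 2 - d).toNat
decreasing_by
  all_goals
    have h1 : 2 * d ≤ m + 1 := by nlinarith [sq_nonneg (d - 1)]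
    have h2 : (0:Int) ≤ m := le_trans (mul_self_nonneg d) h
    omega

-- every positive divisor of an odd positive m is odd
lemma odd_of_dvd_odd {m y : Int} (hmo : m % 2 = 1) (hy : 0 < y) (hdy : y ∣ m) :
    y % 2 = 1 := by
  have h2 : ¬ (2:Int) ∣ y := fun hh => by
    have := dvd_trans hh hdy
    omega
  omega

-- members of the small list: divisors x with d ≤ x and x*x ≤ m  (m odd, d odd)
theorem mem_divLoopB_fst (m d x : Int) (hm : 0 < m) (hmo : m % 2 = 1)
    (hd1 : 1 ≤ d) (hdo : d % 2 = 1) :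
    x ∈ (divLoopB m d [] []).1 ↔ d ≤ x ∧ x * x ≤ m ∧ x ∣ m := by
  by_cases h : d * d ≤ m
  · rw [divLoopB_unfold m d [] [], dif_pos h]
    by_cases hmod : PySem.Int.mod m d = 0
    · have hddvd : d ∣ m := (PySem.Int.mod_eq_zero_iff_dvd m d).mp hmod
      rw [if_pos hmod, divLoopB_acc m (d + 2)]
      have ih := mem_divLoopB_fst m (d + 2) x hm hmo (by omega) (by omega)
      simp only [List.nil_append, List.singleton_append, List.mem_cons, ih]
      constructor
      · rintro (rfl | ⟨hx1, hx2, hx3⟩)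
        · exact ⟨le_refl x, h, hddvd⟩
        · exact ⟨by omega, hx2, hx3⟩
      · rintro ⟨hx1, hx2, hx3⟩
        by_cases hxd : x = d
        · exact Or.inl hxd
        · have hxodd : x % 2 = 1 := odd_of_dvd_odd hmo (by omega) hx3
          exact Or.inr ⟨by omega, hx2, hx3⟩
    · rw [if_neg hmod]
      have ih := mem_divLoopB_fst m (d + 2) x hm hmo (by omega) (by omega)
      rw [ih]
      constructor
      · rintro ⟨hx1, hx2, hx3⟩
        exact ⟨by omega, hx2, hx3⟩
      · rintro ⟨hx1, hx2, hx3⟩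
        have hxd : x ≠ d := fun he =>
          hmod ((PySem.Int.mod_eq_zero_iff_dvd m d).mpr (he ▸ hx3))
        have hxodd : x % 2 = 1 := odd_of_dvd_odd hmo (by omega) hx3
        exact ⟨by omega, hx2, hx3⟩
  · rw [divLoopB_unfold m d [] [], dif_neg h]
    simp only [List.not_mem_nil, false_iff]
    rintro ⟨hx1, hx2, hx3⟩
    nlinarith
termination_by (m + 2 - d).toNat
decreasing_by
  all_goals
    have h1 : 2 * d ≤ m + 1 := by nlinarith [sq_nonneg (d - 1)]
    omega

-- members of the large list: cofactors m/e of the divisors e ≥ d with e*e < m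
theorem mem_divLoopB_snd (m d x : Int) (hm : 0 < m) (hmo : m % 2 = 1)
    (hd1 : 1 ≤ d) (hdo : d % 2 = 1) :
    x ∈ (divLoopB m d [] []).2 ↔ 0 < x ∧ x ∣ m ∧ m < x * x ∧ d * x ≤ m := by
  by_cases h : d * d ≤ m
  · rw [divLoopB_unfold m d [] [], dif_pos h]
    by_cases hmod : PySem.Int.mod m d = 0
    · have hddvd : d ∣ m := (PySem.Int.mod_eq_zero_iff_dvd m d).mp hmod
      have hfd : PySem.Int.floordiv m d = m / d :=
        PySem.Int.floordiv_eq_ediv_of_pos (by omega)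
      have hc : d * (m / d) = m := Int.mul_ediv_cancel' hddvd
      have ih := mem_divLoopB_snd m (d + 2) x hm hmo (by omega) (by omega)
      rw [if_pos hmod, divLoopB_acc m (d + 2)]
      by_cases hsq : d * d ≠ m
      · have hdd : d * d < m := lt_of_le_of_ne h hsq
        have hcpos : 0 < m / d := by nlinarith
        have hdc : d < m / d := by nlinarith
        rw [if_pos hsq, hfd]
        simp only [List.nil_append, List.singleton_append, List.mem_cons, ih]
        constructor
        · rintro (rfl | ⟨hx0, hx1, hx2, hx3⟩)
          · exact ⟨hcpos, ⟨d, by linear_combination -hc⟩, by nlinarith, le_of_eq hc⟩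
          · exact ⟨hx0, hx1, hx2, by nlinarith⟩
        · rintro ⟨hx0, hx1, hx2, hx3⟩
          obtain ⟨e, he⟩ := hx1
          have he0 : 0 < e := by nlinarith
          have hde : d ≤ e := by nlinarith
          have hex : e < x := by nlinarith
          have heodd : e % 2 = 1 := odd_of_dvd_odd hmo he0 ⟨x, by linear_combination he⟩
          by_cases hed : e = d
          · left
            subst hed
            nlinarith
          · right
            exact ⟨hx0, ⟨e, he⟩, hx2, by have hde2 : d + 2 ≤ e := (by omega); nlinarith⟩
      · rw [if_neg hsq]
        rw [not_ne_iff] at hsq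
        simp only [List.nil_append, ih]
        constructor
        · rintro ⟨hx0, hx1, hx2, hx3⟩
          exact ⟨hx0, hx1, hx2, by nlinarith⟩
        · rintro ⟨hx0, hx1, hx2, hx3⟩
          obtain ⟨e, he⟩ := hx1
          have he0 : 0 < e := by nlinarith
          have hde : d ≤ e := by nlinarith
          have hex : e < x := by nlinarith
          have heodd : e % 2 = 1 := odd_of_dvd_odd hmo he0 ⟨x, by linear_combination he⟩
          have hed : e ≠ d := fun hh => by nlinarith
          exact ⟨hx0, ⟨e, he⟩, hx2, by have hde2 : d + 2 ≤ e := (by omega); nlinarith⟩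
    · rw [if_neg hmod]
      have ih := mem_divLoopB_snd m (d + 2) x hm hmo (by omega) (by omega)
      rw [ih]
      constructor
      · rintro ⟨hx0, hx1, hx2, hx3⟩
        exact ⟨hx0, hx1, hx2, by nlinarith⟩
      · rintro ⟨hx0, hx1, hx2, hx3⟩
        obtain ⟨e, he⟩ := hx1
        have he0 : 0 < e := by nlinarith
        have hde : d ≤ e := by nlinarith
        have hex : e < x := by nlinarith
        have heodd : e % 2 = 1 := odd_of_dvd_odd hmo he0 ⟨x, by linear_combination he⟩
        have hed : e ≠ d := fun hh =>
          hmod ((PySem.Int.mod_eq_zero_iff_dvd m d).mpr (hh ▸ ⟨x, by linear_combination he⟩))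
        exact ⟨hx0, ⟨e, he⟩, hx2, by have hde2 : d + 2 ≤ e := (by omega); nlinarith⟩
  · rw [divLoopB_unfold m d [] [], dif_neg h]
    simp only [List.not_mem_nil, false_iff]
    rintro ⟨hx0, hx1, hx2, hx3⟩
    obtain ⟨e, he⟩ := hx1
    have he0 : 0 < e := by nlinarith
    have hde : d ≤ e := by nlinarith
    have hex : e < x := by nlinarith
    nlinarith
termination_by (m + 2 - d).toNat
decreasing_by
  all_goals
    have h1 : 2 * d ≤ m + 1 := by nlinarith [sq_nonneg (d - 1)]
    omega

theorem pairwise_divLoopB_fst (m d : Int) (hm : 0 < m) (hmo : m % 2 = 1)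
    (hd1 : 1 ≤ d) (hdo : d % 2 = 1) :
    (divLoopB m d [] []).1.Pairwise (· < ·) := by
  by_cases h : d * d ≤ m
  · rw [divLoopB_unfold m d [] [], dif_pos h]
    by_cases hmod : PySem.Int.mod m d = 0
    · rw [if_pos hmod, divLoopB_acc m (d + 2)]
      have ih := pairwise_divLoopB_fst m (d + 2) hm hmo (by omega) (by omega)
      simp only [List.nil_append, List.singleton_append, List.pairwise_cons]
      refine ⟨fun y hy => ?_, ih⟩
      have := (mem_divLoopB_fst m (d + 2) y hm hmo (by omega) (by omega)).mp hy
      omega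
    · rw [if_neg hmod]
      exact pairwise_divLoopB_fst m (d + 2) hm hmo (by omega) (by omega)
  · rw [divLoopB_unfold m d [] [], dif_neg h]
    exact List.Pairwise.nil
termination_by (m + 2 - d).toNat
decreasing_by
  all_goals
    have h1 : 2 * d ≤ m + 1 := by nlinarith [sq_nonneg (d - 1)]
    omega

theorem pairwise_divLoopB_snd (m d : Int) (hm : 0 < m) (hmo : m % 2 = 1)
    (hd1 : 1 ≤ d) (hdo : d % 2 = 1) :
    (divLoopB m d [] []).2.Pairwise (fun a b => b < a) := by
  by_cases h : d * d ≤ m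
  · rw [divLoopB_unfold m d [] [], dif_pos h]
    by_cases hmod : PySem.Int.mod m d = 0
    · have hddvd : d ∣ m := (PySem.Int.mod_eq_zero_iff_dvd m d).mp hmod
      have hfd : PySem.Int.floordiv m d = m / d :=
        PySem.Int.floordiv_eq_ediv_of_pos (by omega)
      have hc : d * (m / d) = m := Int.mul_ediv_cancel' hddvd
      rw [if_pos hmod, divLoopB_acc m (d + 2)]
      have ih := pairwise_divLoopB_snd m (d + 2) hm hmo (by omega) (by omega)
      by_cases hsq : d * d ≠ m
      · rw [if_pos hsq, hfd]
        simp only [List.nil_append, List.singleton_append, List.pairwise_cons]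
        refine ⟨fun y hy => ?_, ih⟩
        obtain ⟨hy0, hy1, hy2, hy3⟩ :=
          (mem_divLoopB_snd m (d + 2) y hm hmo (by omega) (by omega)).mp hy
        nlinarith
      · rw [if_neg hsq]
        simpa using ih
    · rw [if_neg hmod]
      exact pairwise_divLoopB_snd m (d + 2) hm hmo (by omega) (by omega)
  · rw [divLoopB_unfold m d [] [], dif_neg h]
    exact List.Pairwise.nil
termination_by (m + 2 - d).toNat
decreasing_by
  all_goals
    have h1 : 2 * d ≤ m + 1 := by nlinarith [sq_nonneg (d - 1)]
    omega

-- two strictly increasing lists with the same members are equal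
lemma eq_of_pairwise_lt_of_mem_iff {l₁ l₂ : List Int}
    (h₁ : l₁.Pairwise (· < ·)) (h₂ : l₂.Pairwise (· < ·))
    (h : ∀ x, x ∈ l₁ ↔ x ∈ l₂) : l₁ = l₂ := by
  have n₁ : l₁.Nodup := h₁.imp ne_of_lt
  have n₂ : l₂.Nodup := h₂.imp ne_of_lt
  exact List.Perm.eq_of_pairwise (fun a b _ _ h1 h2 => absurd h2 (lt_asymm h1)) h₁ h₂
    ((List.perm_ext_iff_of_nodup n₁ n₂).mpr h)

-- B's list (before the final pop): strictly increasing, members = divisors of m in [2, m]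
lemma divsB_spec (m : Int) (hm : 0 < m) (hmo : m % 2 = 1) :
    (PySem.List.slice (divLoopB m 1 [] []).1 (some 1) none ++
      (divLoopB m 1 [] []).2.reverse).Pairwise (· < ·) ∧
    ∀ x, (x ∈ PySem.List.slice (divLoopB m 1 [] []).1 (some 1) none ++
      (divLoopB m 1 [] []).2.reverse ↔ 2 ≤ x ∧ x ≤ m ∧ x ∣ m) := by
  have h11 : (1:Int) * 1 ≤ m := by omega
  have hm1 : PySem.Int.mod m 1 = 0 := (PySem.Int.mod_eq_zero_iff_dvd m 1).mpr (one_dvd m)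
  have hsplit : (divLoopB m 1 [] []).1 = 1 :: (divLoopB m 3 [] []).1 := by
    rw [divLoopB_unfold m 1 [] [], dif_pos h11, if_pos hm1, divLoopB_acc m (1 + 2)]
    norm_num
  rw [hsplit, PySem.List.slice_from_one, List.tail_cons]
  have hmemF := fun x => mem_divLoopB_fst m 3 x hm hmo (by omega) (by omega)
  have hmemS := fun x => mem_divLoopB_snd m 1 x hm hmo (by omega) (by omega)
  constructor
  · rw [List.pairwise_append]
    refine ⟨pairwise_divLoopB_fst m 3 hm hmo (by omega) (by omega), ?_, ?_⟩
    · rw [List.pairwise_reverse]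
      exact pairwise_divLoopB_snd m 1 hm hmo (by omega) (by omega)
    · intro a ha b hb
      obtain ⟨ha1, ha2, ha3⟩ := (hmemF a).mp ha
      obtain ⟨hb0, hb1, hb2, hb3⟩ := (hmemS b).mp (List.mem_reverse.mp hb)
      nlinarith
  · intro x
    rw [List.mem_append, List.mem_reverse, hmemF x, hmemS x]
    constructor
    · rintro (⟨hx1, hx2, hx3⟩ | ⟨hx0, hx1, hx2, hx3⟩)
      · exact ⟨by omega, Int.le_of_dvd hm hx3, hx3⟩
      · refine ⟨?_, Int.le_of_dvd hm hx1, hx1⟩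
        by_contra hcon
        have : x = 1 := by omega
        subst this
        omega
    · rintro ⟨hx1, hx2, hx3⟩
      have hxodd : x % 2 = 1 := odd_of_dvd_odd hmo (by omega) hx3
      by_cases hsq : x * x ≤ m
      · exact Or.inl ⟨by omega, hsq, hx3⟩
      · exact Or.inr ⟨by omega, hx3, by omega, by omega⟩

-- the final B list equals the ascending list of odd proper divisors of num
lemma divs2B_eq (num : Int) (h1 : 1 ≤ num) :
    (if (PySem.List.slice (divLoopB (oddPartB num) 1 [] []).1 (some 1) none ++
          (divLoopB (oddPartB num) 1 [] []).2.reverse) ≠ [] ∧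
        PySem.List.pyGet? (PySem.List.slice (divLoopB (oddPartB num) 1 [] []).1 (some 1) none ++
          (divLoopB (oddPartB num) 1 [] []).2.reverse) (-1) = some num
     then PySem.List.slice (PySem.List.slice (divLoopB (oddPartB num) 1 [] []).1 (some 1) none ++
          (divLoopB (oddPartB num) 1 [] []).2.reverse) none (some (-1))
     else PySem.List.slice (divLoopB (oddPartB num) 1 [] []).1 (some 1) none ++
          (divLoopB (oddPartB num) 1 [] []).2.reverse) =
    (PySem.List.pyRange 2 num 1).filter
      (fun i => PySem.Int.mod num i == 0 && PySem.Int.mod i 2 != 0) := by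
  obtain ⟨hm0, hmdvd, hmodd, hmiff⟩ := oddPartB_spec num (by omega)
  obtain ⟨hpw, hmem⟩ := divsB_spec (oddPartB num) hm0 hmodd
  set m := oddPartB num with hmdef
  set L := PySem.List.slice (divLoopB m 1 [] []).1 (some 1) none ++
    (divLoopB m 1 [] []).2.reverse with hLdef
  set T := (PySem.List.pyRange 2 num 1).filter
    (fun i => PySem.Int.mod num i == 0 && PySem.Int.mod i 2 != 0) with hTdef
  have hT_pw : T.Pairwise (· < ·) := (PySem.List.pairwise_lt_pyRange_one 2 num).filter _
  have hT_mem : ∀ x, x ∈ T ↔ 2 ≤ x ∧ x < num ∧ x ∣ num ∧ x % 2 = 1 := by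
    intro x
    rw [hTdef, List.mem_filter, PySem.List.mem_pyRange_one]
    simp only [Bool.and_eq_true, beq_iff_eq, bne_iff_ne, ne_eq]
    rw [PySem.Int.mod_eq_zero_iff_dvd]
    constructor
    · rintro ⟨⟨a, b⟩, c, d⟩
      rw [PySem.Int.mod_eq_emod_of_pos (by norm_num : (0:Int) < 2)] at d
      exact ⟨a, b, c, by omega⟩
    · rintro ⟨a, b, c, d⟩
      refine ⟨⟨a, b⟩, c, ?_⟩
      rw [PySem.Int.mod_eq_emod_of_pos (by norm_num : (0:Int) < 2)]
      omega
  by_cases hodd : num % 2 = 1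
  · -- num odd: its odd part is num itself
    have hmeq : m = num := by
      have hnd : num ∣ m := (hmiff num hodd).mp dvd_rfl
      exact Int.dvd_antisymm (by omega) (by omega) hmdvd hnd
    by_cases hC : L ≠ [] ∧ PySem.List.pyGet? L (-1) = some num
    · rw [if_pos hC]
      obtain ⟨hne, hget⟩ := hC
      rw [PySem.List.slice_to_neg_one]
      have hgl : L.getLast hne = num := by
        rw [PySem.List.pyGet?_neg_one, List.getLast?_eq_some_getLast hne] at hget
        exact Option.some_injective _ hget
      have hdecomp : L.dropLast ++ [num] = L := by
        conv_rhs => rw [← List.dropLast_append_getLast hne]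
        rw [hgl]
      have hpw' : L.dropLast.Pairwise (· < ·) := hpw.sublist (List.dropLast_sublist L)
      have hxlt : ∀ x ∈ L.dropLast, x < num := by
        intro x hx
        have hpw2 : (L.dropLast ++ [num]).Pairwise (· < ·) := by rw [hdecomp]; exact hpw
        exact (List.pairwise_append.mp hpw2).2.2 x hx num (List.mem_singleton_self num)
      apply eq_of_pairwise_lt_of_mem_iff hpw' hT_pw
      intro x
      rw [hT_mem x]
      constructor
      · intro hx
        have hxL : x ∈ L := (List.dropLast_sublist L).subset hx
        obtain ⟨a, b, c⟩ := (hmem x).mp hxL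
        exact ⟨a, hxlt x hx, hmeq ▸ c, odd_of_dvd_odd hmodd (by omega) c⟩
      · rintro ⟨a, b, c, d⟩
        have hxL : x ∈ L := (hmem x).mpr ⟨a, by omega, hmeq ▸ c⟩
        rw [← hdecomp] at hxL
        rcases List.mem_append.mp hxL with hx | hx
        · exact hx
        · rw [List.mem_singleton] at hx
          omega
    · rw [if_neg hC]
      have hnum_notin : num ∉ L := by
        intro hin
        apply hC
        have hne : L ≠ [] := List.ne_nil_of_mem hin
        refine ⟨hne, ?_⟩
        rw [PySem.List.pyGet?_neg_one, List.getLast?_eq_some_getLast hne]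
        have hglL : L.getLast hne ∈ L := List.getLast_mem hne
        have hgl_le : L.getLast hne ≤ num := by
          have := (hmem _).mp hglL
          omega
        have hdecomp : L.dropLast ++ [L.getLast hne] = L := List.dropLast_append_getLast hne
        have hpw2 : (L.dropLast ++ [L.getLast hne]).Pairwise (· < ·) := by
          rw [hdecomp]; exact hpw
        have hin2 : num ∈ L.dropLast ++ [L.getLast hne] := by rw [hdecomp]; exact hin
        rcases List.mem_append.mp hin2 with hx | hx
        · have := (List.pairwise_append.mp hpw2).2.2 num hx (L.getLast hne)
            (List.mem_singleton_self _)
          omega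
        · rw [List.mem_singleton] at hx
          rw [← hx]
      apply eq_of_pairwise_lt_of_mem_iff hpw hT_pw
      intro x
      rw [hmem x, hT_mem x]
      constructor
      · rintro ⟨a, b, c⟩
        have hxne : x ≠ num := fun he => hnum_notin (he ▸ (hmem x).mpr ⟨a, b, c⟩)
        exact ⟨a, by omega, hmeq ▸ c, odd_of_dvd_odd hmodd (by omega) c⟩
      · rintro ⟨a, b, c, d⟩
        exact ⟨a, by omega, hmeq ▸ c⟩
  · -- num even: the odd part is a proper divisor, the pop never fires
    have hmne : m ≠ num := fun he => by rw [he] at hmodd; omega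
    have hmlt : m < num := lt_of_le_of_ne (Int.le_of_dvd (by omega) hmdvd) hmne
    have hcond : ¬(L ≠ [] ∧ PySem.List.pyGet? L (-1) = some num) := by
      rintro ⟨hne, hget⟩
      have hnum_mem : num ∈ L := PySem.List.mem_of_pyGet?_eq_some L hget
      obtain ⟨a, b, c⟩ := (hmem num).mp hnum_mem
      omega
    rw [if_neg hcond]
    apply eq_of_pairwise_lt_of_mem_iff hpw hT_pw
    intro x
    rw [hmem x, hT_mem x]
    constructor
    · rintro ⟨a, b, c⟩
      have hxodd : x % 2 = 1 := odd_of_dvd_odd hmodd (by omega) c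
      exact ⟨a, by omega, (hmiff x hxodd).mpr c, hxodd⟩
    · rintro ⟨a, b, c, d⟩
      exact ⟨a, Int.le_of_dvd hm0 ((hmiff x d).mp c), (hmiff x d).mp c⟩

-- ===== VERDICT (by name: the statement is the Claim_ definition above) =====
theorem f_spec : Claim_equal_f := by
  intro num hdom hpre
  unfold Spec_f f f_alt
  simp only
  rw [sorted_eq_odds num hpre]
  by_cases h0 : num ≤ 0
  · have : num = 0 := le_antisymm h0 hpre
    subst this
    decide
  · rw [if_neg h0, divs2B_eq num (by omega)]
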